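-- pv_equiv track=rewrite | github.com/zhao-bob/mrppg | leetcode/leet2347.py | countSuit
-- ===== SOURCE A (Python) =====
-- from typing import List
--
-- def countSuit(ranks: List[int]) -> str:
--     count = {}
--     for i in range(len(ranks)):
--         if ranks[i] in count:
--             count[ranks[i]] += 1
--         else:
--             count[ranks[i]] = 1
--
--     max = 0
--     for i in count:
--         if count[i] > max:
--             max = count[i]
--
--     if max >= 3:
--         return "Three of a Kind"
--     elif max >= 2:
--         return "Pair"
--     else:
--         return "High Card"
-- ===== SOURCE B (Python) =====
-- def countSuit(ranks):
--     best = 0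
--     run = 0
--     prev = None
--     for r in sorted(ranks):
--         if prev is not None and r == prev:
--             run += 1
--         else:
--             run = 1
--         prev = r
--         if run > best:
--             best = run
--     if best >= 3:
--         return "Three of a Kind"
--     if best >= 2:
--         return "Pair"
--     return "High Card"
-- ===== Notes on version B (the rewrite author's own statement) =====
-- stated objective: alternative
-- what changed: Replaces the hash-count-then-max-over-dict strategy with sorting a copy of ranks and one linear pass tracking the current and maximal run length of equal adjacent values.
import Mathlib
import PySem

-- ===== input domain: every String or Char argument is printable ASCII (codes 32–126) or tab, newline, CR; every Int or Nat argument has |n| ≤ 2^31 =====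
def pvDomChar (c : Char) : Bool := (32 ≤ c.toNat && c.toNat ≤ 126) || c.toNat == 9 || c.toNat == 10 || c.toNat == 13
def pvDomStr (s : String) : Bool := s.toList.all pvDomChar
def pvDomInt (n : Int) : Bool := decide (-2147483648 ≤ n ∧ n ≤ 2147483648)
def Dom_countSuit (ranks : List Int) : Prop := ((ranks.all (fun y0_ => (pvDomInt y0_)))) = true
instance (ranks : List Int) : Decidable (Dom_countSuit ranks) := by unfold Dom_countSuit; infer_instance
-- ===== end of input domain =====

-- B sorts a copy of ranks and scans runs of equal adjacent values instead of building a hash count map; alternative decomposition, same result.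


-- ===== PORT A =====
def countSuit (ranks : List Int) : String :=
  let count := (PySem.List.pyRange 0 (PySem.List.len ranks) 1).foldl
    (fun (d : PySem.Dict Int Int) i =>
      let x := PySem.List.pyGetD ranks i 0
      if d.contains x then d.insert x (d.getD x 0 + 1) else d.insert x 1)
    PySem.Dict.empty
  let mx := count.keys.foldl
    (fun (mx : Int) k => if count.getD k 0 > mx then count.getD k 0 else mx) 0
  if mx ≥ 3 then "Three of a Kind"
  else if mx ≥ 2 then "Pair"
  else "High Card"

-- ===== PORT B =====
def countSuit_alt (ranks : List Int) : String :=
  let st := (PySem.List.sorted ranks (fun x => x) false).foldl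
    (fun (st : Int × Int × Option Int) r =>
      let run := if st.2.2 = some r then st.2.1 + 1 else 1
      let best := if run > st.1 then run else st.1
      (best, run, some r))
    (0, 0, none)
  if st.1 ≥ 3 then "Three of a Kind"
  else if st.1 ≥ 2 then "Pair"
  else "High Card"

-- ===== PRECONDITION & SPEC =====
def Spec_countSuit (ranks : List Int) (out : String) : Prop := out = countSuit_alt ranks
instance (ranks : List Int) (out : String) : Decidable (Spec_countSuit ranks out) := by unfold Spec_countSuit; infer_instance

-- ===== CLAIM (what is proved, stated in full; the proofs are below) =====
def Claim_equal_countSuit : Prop := ∀ (ranks : List Int), Dom_countSuit ranks → Spec_countSuit ranks (countSuit ranks)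

-- ===== LEMMAS AND PROOFS =====

/-- Spec of B's run scan: maximal run contribution of the remaining sorted list,
given the current run length of the previous value `p`. -/
def gRun : List Int → Int → Int → Int
  | [], run, _ => run
  | a :: l, run, p => if a = p then gRun l (run + 1) p else max run (gRun l 1 a)

theorem ite_gt_eq_max (a b : Int) : (if a > b then a else b) = max b a := by
  rcases max_cases b a with ⟨h1, h2⟩ | ⟨h1, h2⟩ <;> rw [h1] <;> split <;> omega

theorem run_le_gRun (l : List Int) (run p : Int) : run ≤ gRun l run p := by
  induction l generalizing run p with
  | nil => simp [gRun]
  | cons a l ih =>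
    simp only [gRun]
    split
    · exact le_trans (by omega) (ih (run + 1) p)
    · exact le_max_left _ _

/-- B's loop body, named for the proofs. -/
def stepB (st : Int × Int × Option Int) (r : Int) : Int × Int × Option Int :=
  (if (if st.2.2 = some r then st.2.1 + 1 else 1) > st.1
     then (if st.2.2 = some r then st.2.1 + 1 else 1) else st.1,
   if st.2.2 = some r then st.2.1 + 1 else 1, some r)

theorem stepB_same (best run r : Int) :
    stepB (best, run, some r) r = (max best (run + 1), run + 1, some r) := by
  simp [stepB]
  rcases max_cases best (run + 1) with ⟨h1, h2⟩ | ⟨h1, h2⟩ <;> split <;> omega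

theorem stepB_diff (best run p r : Int) (h : p ≠ r) :
    stepB (best, run, some p) r = (max best 1, 1, some r) := by
  simp [stepB, h]
  rcases max_cases best (1 : Int) with ⟨h1, h2⟩ | ⟨h1, h2⟩ <;> split <;> omega

theorem stepB_none (best run r : Int) :
    stepB (best, run, none) r = (max best 1, 1, some r) := by
  simp [stepB]
  rcases max_cases best (1 : Int) with ⟨h1, h2⟩ | ⟨h1, h2⟩ <;> split <;> omega

theorem scan_fst (l : List Int) (best run p : Int) (h : run ≤ best) :
    (l.foldl stepB (best, run, some p)).1 = max best (gRun l run p) := by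
  induction l generalizing best run p with
  | nil => simp [gRun]; omega
  | cons a l ih =>
    rw [List.foldl_cons]
    by_cases hap : a = p
    · subst hap
      have hgr : gRun (a :: l) run a = gRun l (run + 1) a := by simp [gRun]
      rw [stepB_same, ih _ _ _ (le_max_right _ _), hgr]
      have hg := run_le_gRun l (run + 1) a
      rcases max_cases best (run + 1) with ⟨h1, h2⟩ | ⟨h1, h2⟩ <;>
        rcases max_cases (max best (run + 1)) (gRun l (run + 1) a) with ⟨h3, h4⟩ | ⟨h3, h4⟩ <;>
        rcases max_cases best (gRun l (run + 1) a) with ⟨h5, h6⟩ | ⟨h5, h6⟩ <;> omega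
    · rw [stepB_diff best run p a (fun hh => hap hh.symm), ih _ _ _ (le_max_right _ _)]
      simp only [gRun, if_neg hap]
      have hg := run_le_gRun l 1 a
      rcases max_cases best (1 : Int) with ⟨h1, h2⟩ | ⟨h1, h2⟩ <;>
        rcases max_cases (max best 1) (gRun l 1 a) with ⟨h3, h4⟩ | ⟨h3, h4⟩ <;>
        rcases max_cases run (gRun l 1 a) with ⟨h5, h6⟩ | ⟨h5, h6⟩ <;>
        rcases max_cases best (max run (gRun l 1 a)) with ⟨h7, h8⟩ | ⟨h7, h8⟩ <;> omega

theorem gRun_lb (l : List Int) (run p : Int)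
    (hs : l.Pairwise (· ≤ ·)) (hge : ∀ y ∈ l, p ≤ y) :
    run + l.count p ≤ gRun l run p := by
  induction l generalizing run p with
  | nil => simp [gRun]
  | cons a l ih =>
    simp only [gRun]
    by_cases hap : a = p
    · subst hap
      rw [if_pos rfl, List.count_cons_self]
      have := ih (run + 1) a hs.of_cons (List.pairwise_cons.mp hs).1
      push_cast
      omega
    · rw [if_neg hap]
      have hplt : p < a := lt_of_le_of_ne (hge a (by simp)) (fun h => hap h.symm)
      have hnp : p ∉ l := fun hmem =>
        absurd ((List.pairwise_cons.mp hs).1 p hmem) (by omega)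
      rw [List.count_cons_of_ne hap, List.count_eq_zero.mpr hnp]
      have := le_max_left run (gRun l 1 a)
      omega

theorem gRun_other (l : List Int) (run p x : Int)
    (hs : l.Pairwise (· ≤ ·)) (hge : ∀ y ∈ l, p ≤ y) (hx : x ∈ l) (hxp : x ≠ p) :
    l.count x ≤ gRun l run p := by
  induction l generalizing run p with
  | nil => simp at hx
  | cons a l ih =>
    simp only [gRun]
    have hta : ∀ y ∈ l, a ≤ y := (List.pairwise_cons.mp hs).1
    by_cases hap : a = p
    · subst hap
      rw [if_pos rfl]
      have hxl : x ∈ l := List.mem_of_ne_of_mem hxp hx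
      rw [List.count_cons_of_ne (Ne.symm hxp)]
      exact ih (run + 1) a hs.of_cons hta hxl hxp
    · rw [if_neg hap]
      by_cases hxa : x = a
      · subst hxa
        have hlb := gRun_lb l 1 x hs.of_cons hta
        have := le_max_right run (gRun l 1 x)
        rw [List.count_cons_self]
        push_cast
        omega
      · have hxl : x ∈ l := List.mem_of_ne_of_mem hxa hx
        rw [List.count_cons_of_ne (Ne.symm hxa)]
        exact le_trans (ih 1 a hs.of_cons hta hxl hxa) (le_max_right _ _)

theorem gRun_le (l : List Int) (run p K : Int)
    (hs : l.Pairwise (· ≤ ·)) (hge : ∀ y ∈ l, p ≤ y)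
    (h1 : run + l.count p ≤ K) (h2 : ∀ x ∈ l, x ≠ p → (l.count x : Int) ≤ K) :
    gRun l run p ≤ K := by
  induction l generalizing run p with
  | nil => simp only [gRun]; simp at h1; omega
  | cons a l ih =>
    simp only [gRun]
    have hta : ∀ y ∈ l, a ≤ y := (List.pairwise_cons.mp hs).1
    by_cases hap : a = p
    · subst hap
      rw [if_pos rfl]
      refine ih (run + 1) a hs.of_cons hta ?_ ?_
      · rw [List.count_cons_self] at h1; push_cast at h1 ⊢; omega
      · intro x hx hxa
        have := h2 x (by simp [hx]) hxa
        rwa [List.count_cons_of_ne (Ne.symm hxa)] at this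
    · rw [if_neg hap]
      have hplt : p < a := lt_of_le_of_ne (hge a (by simp)) (fun h => hap h.symm)
      have hnp : p ∉ l := fun hmem =>
        absurd ((List.pairwise_cons.mp hs).1 p hmem) (by omega)
      have hcp : l.count p = 0 := List.count_eq_zero.mpr hnp
      rw [List.count_cons_of_ne hap, hcp] at h1
      refine max_le (by omega) (ih 1 a hs.of_cons hta ?_ ?_)
      · have := h2 a (by simp) hap
        rw [List.count_cons_self] at this; push_cast at this ⊢; omega
      · intro x hx hxa
        have hxp : x ≠ p := fun h => hnp (h ▸ hx)
        have := h2 x (by simp [hx]) hxp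
        rwa [List.count_cons_of_ne (Ne.symm hxa)] at this

/-- A's dict is the counter. -/
theorem countA_eq_counter (ranks : List Int) :
    (PySem.List.pyRange 0 (PySem.List.len ranks) 1).foldl
      (fun (d : PySem.Dict Int Int) i =>
        if d.contains (PySem.List.pyGetD ranks i 0)
          then d.insert (PySem.List.pyGetD ranks i 0) (d.getD (PySem.List.pyGetD ranks i 0) 0 + 1)
          else d.insert (PySem.List.pyGetD ranks i 0) 1)
      PySem.Dict.empty = PySem.Dict.counter ranks := by
  rw [PySem.List.foldl_pyRange_zero_pyGetD
    (f := fun (d : PySem.Dict Int Int) x =>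
      if d.contains x then d.insert x (d.getD x 0 + 1) else d.insert x 1)]
  rw [← PySem.Dict.foldl_insert_getD_add_one_eq_counter]
  apply List.foldl_ext
  intro d x _
  by_cases h : d.contains x
  · simp [h]
  · have h0 : d.contains x = false := by simpa using h
    simp [h0, PySem.Dict.getD_of_not_contains]

/-- A's second loop is the max of the counts. -/
theorem maxA_char (ranks : List Int) :
    0 ≤ ((PySem.Dict.counter ranks).keys.foldl
        (fun (mx : Int) k => if (PySem.Dict.counter ranks).getD k 0 > mx then (PySem.Dict.counter ranks).getD k 0 else mx) 0) ∧
    (∀ x ∈ ranks, (ranks.count x : Int) ≤ ((PySem.Dict.counter ranks).keys.foldl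
        (fun (mx : Int) k => if (PySem.Dict.counter ranks).getD k 0 > mx then (PySem.Dict.counter ranks).getD k 0 else mx) 0)) ∧
    (((PySem.Dict.counter ranks).keys.foldl
        (fun (mx : Int) k => if (PySem.Dict.counter ranks).getD k 0 > mx then (PySem.Dict.counter ranks).getD k 0 else mx) 0) = 0 ∨
      ∃ k ∈ ranks, ((PySem.Dict.counter ranks).keys.foldl
        (fun (mx : Int) k => if (PySem.Dict.counter ranks).getD k 0 > mx then (PySem.Dict.counter ranks).getD k 0 else mx) 0) = ranks.count k) := by
  have hrw : ((PySem.Dict.counter ranks).keys.foldl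
      (fun (mx : Int) k => if (PySem.Dict.counter ranks).getD k 0 > mx then (PySem.Dict.counter ranks).getD k 0 else mx) 0)
      = (PySem.Dict.counter ranks).keys.foldl (fun (m : Int) k => max m ((ranks.count k : Int))) 0 := by
    apply List.foldl_ext
    intro m k _
    rw [PySem.Dict.getD_counter ranks k, ite_gt_eq_max]
  have hkeys : (PySem.Dict.counter ranks).keys = PySem.Set.ofList ranks := PySem.Dict.keys_counter ranks
  have hchar := PySem.List.le_foldl_max_int (PySem.Dict.counter ranks).keys (fun k => (ranks.count k : Int)) 0
  refine ⟨hrw ▸ hchar.1, ?_, ?_⟩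
  · intro x hx
    have hxk : x ∈ (PySem.Dict.counter ranks).keys := by
      rw [hkeys]; exact (PySem.Set.mem_ofList ranks x).mpr hx
    exact hrw ▸ hchar.2 x hxk
  · have hmap : ((PySem.Dict.counter ranks).keys.map (fun k => (ranks.count k : Int))).foldl max 0
        = (PySem.Dict.counter ranks).keys.foldl (fun (m : Int) k => max m ((ranks.count k : Int))) 0 := by
      rw [List.foldl_map]
    rcases PySem.List.foldl_max_mem ((PySem.Dict.counter ranks).keys.map (fun k => (ranks.count k : Int))) 0 with h | h
    · exact Or.inl (by rw [hrw, ← hmap, h])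
    · rcases List.mem_map.mp h with ⟨k, hk, hkv⟩
      refine Or.inr ⟨k, ?_, by rw [hrw, ← hmap, ← hkv]⟩
      rw [hkeys] at hk
      exact (PySem.Set.mem_ofList ranks k).mp hk

-- ===== VERDICT (by name: the statement is the Claim_ definition above) =====
theorem countSuit_spec : Claim_equal_countSuit := by
  intro ranks _
  unfold Spec_countSuit countSuit countSuit_alt
  dsimp only
  rw [countA_eq_counter]
  obtain ⟨hmx0, hub, hmem⟩ := maxA_char ranks
  set cnt := PySem.Dict.counter ranks with hcnt
  set mx := cnt.keys.foldl (fun (m : Int) k => if cnt.getD k 0 > m then cnt.getD k 0 else m) 0 with hmxdef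
  -- B's loop body is stepB (definitionally)
  have hstep : ∀ (l : List Int) (st : Int × Int × Option Int),
      l.foldl (fun (st : Int × Int × Option Int) r =>
        (if (if st.2.2 = some r then st.2.1 + 1 else 1) > st.1
           then (if st.2.2 = some r then st.2.1 + 1 else 1) else st.1,
         if st.2.2 = some r then st.2.1 + 1 else 1, some r)) st = l.foldl stepB st :=
    fun l st => rfl
  rw [hstep]
  have hperm : (PySem.List.sorted ranks (fun x => x) false).Perm ranks :=
    PySem.List.sorted_perm ranks (fun x => x) false
  have hpw : (PySem.List.sorted ranks (fun x => x) false).Pairwise (· ≤ ·) := by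
    simpa using PySem.List.sorted_pairwise ranks (fun x => x)
  rcases hsval : PySem.List.sorted ranks (fun x => x) false with _ | ⟨a, t⟩
  · -- ranks is empty: both sides are "High Card"
    rw [hsval] at hperm
    have hre : ranks = [] := List.length_eq_zero_iff.mp (by simpa using hperm.length_eq.symm)
    rw [hmxdef, hcnt, hre]
    decide
  · rw [hsval] at hperm hpw
    have hcount : ∀ x, (a :: t).count x = ranks.count x := fun x => hperm.count_eq x
    have hmemeq : ∀ x, x ∈ a :: t ↔ x ∈ ranks := fun x => hperm.mem_iff
    have hta : ∀ y ∈ t, a ≤ y := (List.pairwise_cons.mp hpw).1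
    have htpw : t.Pairwise (· ≤ ·) := hpw.of_cons
    have hfold : ((a :: t).foldl stepB (0, 0, none)).1 = max 1 (gRun t 1 a) := by
      rw [List.foldl_cons, stepB_none, scan_fst t (max 0 1) 1 a (by omega)]
      norm_num
    have hamem : a ∈ ranks := (hmemeq a).mp (by simp)
    have hca : (1 : Int) + t.count a = ((ranks.count a : Int)) := by
      rw [← hcount a, List.count_cons_self]; push_cast; omega
    have h1mx : 1 ≤ mx := by
      have h1 := hub a hamem
      have h2 : 0 < ranks.count a := List.count_pos_iff.mpr hamem
      omega
    have hbest : max 1 (gRun t 1 a) = mx := by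
      apply le_antisymm
      · refine max_le h1mx (gRun_le t 1 a mx htpw hta ?_ ?_)
        · rw [hca]; exact hub a hamem
        · intro x hx _
          have hxr : x ∈ ranks := (hmemeq x).mp (by simp [hx])
          have h3 := hub x hxr
          have h4 : (t.count x : Int) ≤ (ranks.count x : Int) := by
            rw [← hcount x, List.count_cons]
            push_cast
            split <;> omega
          omega
      · rcases hmem with h0 | ⟨k, hk, hkv⟩
        · omega
        · have hks : k ∈ a :: t := (hmemeq k).mpr hk
          by_cases hka : k = a
          · subst hka
            have h5 := gRun_lb t 1 k htpw hta
            have h6 := le_max_right (1 : Int) (gRun t 1 k)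
            omega
          · have hkt : k ∈ t := List.mem_of_ne_of_mem hka hks
            have h5 := gRun_other t 1 a k htpw hta hkt hka
            have h6 : (ranks.count k : Int) = (t.count k : Int) := by
              rw [← hcount k, List.count_cons_of_ne (Ne.symm hka)]
            have h7 := le_max_right (1 : Int) (gRun t 1 a)
            omega
    rw [hfold, hbest]
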